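-- pv_equiv track=rewrite | github.com/YannFigueiredo/Simulador-AFD | registro.py | separar_alf
-- ===== SOURCE A (Python) =====
-- def separar_alf(afd):
--   cont_chav = 0
--   alf = []
--   for i in range(0, len(afd)):
--     if cont_chav < 2 and afd[i]!=',' and afd[i]!='{' and afd[i]!='}' and afd[i]!=' ' and afd[i]!='(' and afd[i]!=')':
--       alf.append(afd[i])
--     if afd[i] == '{' or afd[i] == '}':
--       cont_chav += 1
--   return alf
-- ===== SOURCE B (Python) =====
-- SEPARATORS = {',', '{', '}', ' ', '(', ')'}
--
-- def separar_alf(afd):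
--     braces = [i for i, c in enumerate(afd) if c in '{}']
--     cut = braces[1] if len(braces) >= 2 else len(afd)
--     return [c for c in afd[:cut] if c not in SEPARATORS]
-- ===== Notes on version B (the rewrite author's own statement) =====
-- stated objective: simpler
-- what changed: Replaced the counter-driven single loop by a two-phase decomposition: first locate the second brace to get a cutoff index, then filter the prefix before it through a separator set.
import Mathlib
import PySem

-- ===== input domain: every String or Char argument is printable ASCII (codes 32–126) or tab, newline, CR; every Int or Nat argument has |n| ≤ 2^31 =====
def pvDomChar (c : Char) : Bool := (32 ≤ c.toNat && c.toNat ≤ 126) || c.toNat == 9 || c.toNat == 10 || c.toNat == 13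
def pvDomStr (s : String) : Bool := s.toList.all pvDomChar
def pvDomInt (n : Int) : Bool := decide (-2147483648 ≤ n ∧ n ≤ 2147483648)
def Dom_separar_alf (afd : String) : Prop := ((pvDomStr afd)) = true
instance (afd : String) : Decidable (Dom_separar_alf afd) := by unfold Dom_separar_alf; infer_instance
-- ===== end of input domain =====

-- B: two-phase decomposition — locate the second brace for a cutoff, then filter the prefix; same cost, simpler.


-- ===== PORT A =====
-- the loop body: state = (cont_chav, alf)
def sepStepA (st : Int × List String) (c : Char) : Int × List String :=
  let alf := if st.1 < 2 && c ≠ ',' && c ≠ '{' && c ≠ '}' && c ≠ ' ' && c ≠ '(' && c ≠ ')'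
             then st.2 ++ [String.mk [c]] else st.2
  let cont := if c = '{' || c = '}' then st.1 + 1 else st.1
  (cont, alf)

def separar_alf (afd : String) : List String :=
  (afd.toList.foldl sepStepA (0, [])).2

-- ===== PORT B =====
def sepIsSep (c : Char) : Bool := c = ',' || c = '{' || c = '}' || c = ' ' || c = '(' || c = ')'
def sepIsBrace (c : Char) : Bool := c = '{' || c = '}'
-- 'braces[1] if len(braces) >= 2 else len(afd)': index of the second element, or the default
def sepSecond (l : List (Int × Char)) (dflt : Int) : Int :=
  match l with
  | _ :: (i, _) :: _ => i
  | _ => dflt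

def separar_alf_alt (afd : String) : List String :=
  let cs := afd.toList
  let braces := (PySem.List.enumerate cs).filter (fun p => sepIsBrace p.2)
  let cut := sepSecond braces (cs.length : Int)
  ((cs.take cut.toNat).filter (fun c => !sepIsSep c)).map (fun c => String.mk [c])

-- ===== PRECONDITION & SPEC =====
def Spec_separar_alf (afd : String) (out : List String) : Prop := out = separar_alf_alt afd
instance (afd : String) (out : List String) : Decidable (Spec_separar_alf afd out) := by unfold Spec_separar_alf; infer_instance

-- ===== CLAIM (what is proved, stated in full; the proofs are below) =====
def Claim_equal_separar_alf : Prop := ∀ (afd : String), Dom_separar_alf afd → Spec_separar_alf afd (separar_alf afd)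

-- ===== LEMMAS AND PROOFS =====

-- position of the n-th brace (1-based), or the length if there are fewer
def sepCutN (n : Nat) : List Char → Nat
  | [] => 0
  | c :: cs => if sepIsBrace c then (if n = 1 then 0 else sepCutN (n - 1) cs + 1) else sepCutN n cs + 1

-- index of the first element, or the default
def sepFirst (l : List (Int × Char)) (dflt : Int) : Int :=
  match l with
  | (i, _) :: _ => i
  | [] => dflt

theorem sepStepA_filter (c : Char) (n : Int) :
    (n < 2 && c ≠ ',' && c ≠ '{' && c ≠ '}' && c ≠ ' ' && c ≠ '(' && c ≠ ')') =
      (decide (n < 2) && !sepIsSep c) := by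
  simp [sepIsSep, Bool.and_assoc, Bool.not_or]

theorem sepFoldA_acc (cs : List Char) (cont : Int) (alf : List String) :
    (cs.foldl sepStepA (cont, alf)).2 = alf ++ (cs.foldl sepStepA (cont, [])).2 := by
  induction cs generalizing cont alf with
  | nil => simp
  | cons c cs ih =>
    simp only [List.foldl_cons, sepStepA]
    rw [ih, ih (if c = '{' || c = '}' then cont + 1 else cont)
      (if (cont < 2 && c ≠ ',' && c ≠ '{' && c ≠ '}' && c ≠ ' ' && c ≠ '(' && c ≠ ')')
       then [] ++ [String.mk [c]] else [])]
    split <;> simp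

theorem sepFoldA_ge2 (cs : List Char) (cont : Int) (h : 2 ≤ cont) :
    (cs.foldl sepStepA (cont, [])).2 = [] := by
  induction cs generalizing cont with
  | nil => rfl
  | cons c cs ih =>
    simp only [List.foldl_cons, sepStepA, sepStepA_filter]
    have h1 : ¬ cont < 2 := by omega
    rw [decide_eq_false h1, Bool.false_and, if_neg Bool.false_ne_true]
    split
    · exact ih (cont + 1) (by omega)
    · exact ih cont h

theorem sepFoldA_cut (cs : List Char) (n : Nat) (h1 : 1 ≤ n) (h2 : n ≤ 2) :
    (cs.foldl sepStepA ((2 - (n : Int)), [])).2 =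
      ((cs.take (sepCutN n cs)).filter (fun c => !sepIsSep c)).map (fun c => String.mk [c]) := by
  induction cs generalizing n with
  | nil => simp [sepCutN]
  | cons c cs ih =>
    simp only [List.foldl_cons, sepStepA, sepStepA_filter]
    have hlt : (2 - (n : Int)) < 2 := by omega
    rw [decide_eq_true hlt, Bool.true_and]
    by_cases hb : sepIsBrace c = true
    · have hs : sepIsSep c = true := by
        simp only [sepIsBrace, Bool.or_eq_true, decide_eq_true_eq] at hb
        simp only [sepIsSep, Bool.or_eq_true, decide_eq_true_eq]; tauto
      have hbr : (c = '{' || c = '}') = true := hb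
      rw [hs]
      simp only [Bool.not_true, Bool.and_false, if_neg (Bool.false_ne_true), if_pos hbr]
      have hn : n = 1 ∨ n = 2 := by omega
      rcases hn with rfl | rfl
      · have : (2 - ((1:Nat) : Int)) + 1 = 2 := by norm_num
        rw [this, sepFoldA_ge2 _ _ le_rfl]
        simp [sepCutN, hb]
      · have : (2 - ((2:Nat) : Int)) + 1 = 2 - ((1:Nat) : Int) := by norm_num
        rw [this, ih 1 le_rfl (by norm_num)]
        simp [sepCutN, hb, hs]
    · have hbr : (c = '{' || c = '}') = false := by simpa [sepIsBrace] using hb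
      rw [if_neg (by simp [hbr]), sepFoldA_acc, ih n h1 h2]
      simp only [sepCutN, hb, Bool.false_eq_true, if_false, List.take_succ_cons,
        List.filter_cons]
      by_cases hs : sepIsSep c = true
      · simp [hs]
      · simp only [Bool.not_eq_true] at hs
        simp [hs]

theorem sepFirstBrace (cs : List Char) (off : Int) :
    sepFirst ((PySem.List.enumerate cs off).filter (fun p => sepIsBrace p.2))
      ((cs.length : Int) + off) = (sepCutN 1 cs : Int) + off := by
  induction cs generalizing off with
  | nil => simp [PySem.List.enumerate_nil, sepFirst, sepCutN]
  | cons c cs ih =>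
    rw [PySem.List.enumerate_cons, List.filter_cons]
    by_cases hb : sepIsBrace c = true
    · simp [hb, sepFirst, sepCutN]
    · simp only [hb, Bool.false_eq_true, if_false]
      have := ih (off + 1)
      rw [show (cs.length : Int) + (off + 1) = ((c :: cs).length : Int) + off by
        simp; push_cast; ring] at this
      rw [this]
      simp [sepCutN, hb]; push_cast; ring

theorem sepSecondBrace (cs : List Char) (off : Int) :
    sepSecond ((PySem.List.enumerate cs off).filter (fun p => sepIsBrace p.2))
      ((cs.length : Int) + off) = (sepCutN 2 cs : Int) + off := by
  induction cs generalizing off with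
  | nil => simp [PySem.List.enumerate_nil, sepSecond, sepCutN]
  | cons c cs ih =>
    rw [PySem.List.enumerate_cons, List.filter_cons]
    by_cases hb : sepIsBrace c = true
    · simp only [hb, if_true]
      have := sepFirstBrace cs (off + 1)
      rw [show (cs.length : Int) + (off + 1) = ((c :: cs).length : Int) + off by
        simp; push_cast; ring] at this
      have hmatch : sepSecond ((off, c) ::
          ((PySem.List.enumerate cs (off + 1)).filter (fun p => sepIsBrace p.2)))
          (((c :: cs).length : Int) + off) =
          sepFirst ((PySem.List.enumerate cs (off + 1)).filter (fun p => sepIsBrace p.2))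
          (((c :: cs).length : Int) + off) := by
        cases h : (PySem.List.enumerate cs (off + 1)).filter (fun p => sepIsBrace p.2) with
        | nil => rfl
        | cons p t => cases p; rfl
      rw [hmatch, this]
      simp [sepCutN, hb]
      push_cast; ring
    · simp only [hb, Bool.false_eq_true, if_false]
      have := ih (off + 1)
      rw [show (cs.length : Int) + (off + 1) = ((c :: cs).length : Int) + off by
        simp; push_cast; ring] at this
      rw [this]
      simp [sepCutN, hb]; push_cast; ring

-- ===== VERDICT (by name: the statement is the Claim_ definition above) =====
theorem separar_alf_spec : Claim_equal_separar_alf := by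
  intro afd _
  simp only [Spec_separar_alf, separar_alf, separar_alf_alt]
  have hcut := sepSecondBrace afd.toList 0
  rw [add_zero, add_zero] at hcut
  rw [hcut]
  have hnat : ((sepCutN 2 afd.toList : Int)).toNat = sepCutN 2 afd.toList := Int.toNat_natCast _
  rw [hnat]
  have := sepFoldA_cut afd.toList 2 (by norm_num) le_rfl
  rw [show (2 - ((2:Nat) : Int)) = 0 by norm_num] at this
  exact this
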